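-- pv_equiv track=rewrite | github.com/023javi/ETSI-PlanificadorHorarios | ComputacionEvolutiva.py | calculate_p1_final
-- ===== SOURCE A (Python) =====
-- def calculate_p1_final(solution, dataset):
--     ### Aquí vamos a calcular el número de huecos entre las asignaturas del horario ###
--     p1 = 0
--     solution_transp = zip(*solution)
--     for day in solution_transp:
--         occupied_possitions = [i for i, cells in enumerate(day) if len(cells) > 0]
--         if occupied_possitions:
--             start = occupied_possitions[0]
--             end = occupied_possitions[-1]
--             p1 += sum(1 for i in range(start, end+1) if len(day[i]) == 0)
--     return int(p1)
-- ===== SOURCE B (Python) =====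
-- def calculate_p1_final(solution, dataset):
--     # One pass per day: holes between first and last occupied slot
--     # = (last - first + 1) - number_of_occupied (closed form, no inner rescan).
--     p1 = 0
--     for day in zip(*solution):
--         first = -1
--         last = -1
--         occupied = 0
--         for i, cells in enumerate(day):
--             if cells:
--                 if first < 0:
--                     first = i
--                 last = i
--                 occupied += 1
--         if occupied:
--             p1 += (last - first + 1) - occupied
--     return p1
-- ===== Notes on version B (the rewrite author's own statement) =====
-- stated objective: simpler
-- what changed: Instead of materialising the list of occupied indices per column and then rescanning day[start..end] counting empties, B makes a single pass per column tracking first/last occupied index and the occupied count, and adds the closed form (last-first+1)-occupied.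
import Mathlib
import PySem

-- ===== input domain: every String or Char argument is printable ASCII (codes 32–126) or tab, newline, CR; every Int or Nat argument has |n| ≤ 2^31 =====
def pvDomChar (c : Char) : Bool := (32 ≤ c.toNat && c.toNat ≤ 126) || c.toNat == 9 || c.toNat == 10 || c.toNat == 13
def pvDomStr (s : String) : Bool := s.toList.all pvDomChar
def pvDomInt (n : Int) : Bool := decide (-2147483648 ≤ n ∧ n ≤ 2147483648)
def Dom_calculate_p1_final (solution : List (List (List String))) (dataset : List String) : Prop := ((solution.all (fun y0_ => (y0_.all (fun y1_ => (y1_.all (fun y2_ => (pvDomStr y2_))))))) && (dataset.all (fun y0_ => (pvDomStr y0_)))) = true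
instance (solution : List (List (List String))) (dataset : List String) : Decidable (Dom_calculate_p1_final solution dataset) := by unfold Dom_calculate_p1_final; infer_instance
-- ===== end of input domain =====

-- B replaces A's per-column occupied-index list + rescan of the occupied span by a single
-- pass tracking first/last occupied index and occupied count, adding (last-first+1)-occupied
-- (simpler; same asymptotic cost).

-- ===== PORT A =====
-- zip(*solution): columns, truncated to the shortest row (shared by both ports)
def pvZipStar (sol : List (List (List String))) : List (List (List String)) :=
  match (sol.map List.length).min? with
  | none => []
  | some m => (List.range m).map (fun j => sol.map (fun row => row.getD j []))

-- [i for i, cells in enumerate(day) if len(cells) > 0]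
def pvOccA (day : List (List String)) : List Int :=
  ((PySem.List.enumerate day 0).filter (fun p => decide (0 < p.2.length))).map Prod.fst

-- loop body of A: if occupied: p1 += sum(1 for i in range(start, end+1) if len(day[i]) == 0)
def pvStepA (p1 : Int) (day : List (List String)) : Int :=
  match pvOccA day with
  | [] => p1
  | o :: os =>
    p1 + ((PySem.List.pyRange o (os.getLastD o + 1) 1).map
        (fun i => if (PySem.List.pyGetD day i []).length = 0 then (1 : Int) else 0)).sum

def calculate_p1_final (solution : List (List (List String))) (dataset : List String) : Int :=
  (pvZipStar solution).foldl pvStepA 0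

-- ===== PORT B =====
-- inner loop body of B: state (first, last, occupied)
def pvCellStep (s : Int × Int × Int) (p : Int × List String) : Int × Int × Int :=
  if p.2.isEmpty then s
  else ((if s.1 < 0 then p.1 else s.1), p.1, s.2.2 + 1)

-- loop body of B: one pass then the closed form (last - first + 1) - occupied
def pvStepB (p1 : Int) (day : List (List String)) : Int :=
  let st := (PySem.List.enumerate day 0).foldl pvCellStep (-1, -1, 0)
  if st.2.2 ≠ 0 then p1 + ((st.2.1 - st.1 + 1) - st.2.2) else p1

def calculate_p1_final_alt (solution : List (List (List String))) (dataset : List String) : Int :=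
  (pvZipStar solution).foldl pvStepB 0

-- ===== PRECONDITION & SPEC =====
def Spec_calculate_p1_final (solution : List (List (List String))) (dataset : List String) (out : Int) : Prop := out = calculate_p1_final_alt solution dataset
instance (solution : List (List (List String))) (dataset : List String) (out : Int) : Decidable (Spec_calculate_p1_final solution dataset out) := by unfold Spec_calculate_p1_final; infer_instance

-- ===== CLAIM (what is proved, stated in full; the proofs are below) =====
def Claim_equal_calculate_p1_final : Prop := ∀ (solution : List (List (List String))) (dataset : List String), Dom_calculate_p1_final solution dataset → Spec_calculate_p1_final solution dataset (calculate_p1_final solution dataset)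

-- ===== LEMMAS AND PROOFS =====

-- the occupied-index list with a generalized start, for induction
def occG (day : List (List String)) (s : Int) : List Int :=
  ((PySem.List.enumerate day s).filter (fun p => decide (0 < p.2.length))).map Prod.fst

theorem occG_nil (s : Int) : occG [] s = [] := by
  simp [occG, PySem.List.enumerate]

theorem occG_cons (x : List String) (xs : List (List String)) (s : Int) :
    occG (x :: xs) s = if 0 < x.length then s :: occG xs (s + 1) else occG xs (s + 1) := by
  by_cases h : 0 < x.length <;>
    simp [occG, PySem.List.enumerate_cons, h]

theorem mem_occG (day : List (List String)) (s i : Int) :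
    i ∈ occG day s ↔ ∃ k : Nat, ∃ h : k < day.length, i = s + k ∧ 0 < day[k].length := by
  simp only [occG, List.mem_map, List.mem_filter, PySem.List.mem_enumerate_iff]
  constructor
  · rintro ⟨⟨j, cells⟩, ⟨⟨k, hk, hp⟩, hc⟩, rfl⟩
    cases hp
    exact ⟨k, hk, rfl, by simpa using hc⟩
  · rintro ⟨k, hk, rfl, hc⟩
    exact ⟨(s + k, day[k]), ⟨⟨k, hk, rfl⟩, by simpa using hc⟩, rfl⟩

theorem pairwise_occG (day : List (List String)) (s : Int) :
    (occG day s).Pairwise (· < ·) := by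
  have h := PySem.List.pairwise_lt_enumerate day s
  exact ((h.filter _).map _ (fun a b hab => hab))

-- first element of a pairwise-< list is minimal, getLastD is maximal and a member
theorem head_le_of_pairwise (o : Int) (os : List Int) (h : (o :: os).Pairwise (· < ·))
    (i : Int) (hi : i ∈ o :: os) : o ≤ i := by
  rcases List.mem_cons.1 hi with rfl | hi
  · exact le_refl i
  · exact le_of_lt ((List.pairwise_cons.1 h).1 i hi)

theorem le_getLastD_of_pairwise (os : List Int) : ∀ (o : Int), (o :: os).Pairwise (· < ·) →
    ∀ i ∈ o :: os, i ≤ os.getLastD o := by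
  induction os with
  | nil => intro o _ i hi; simp at hi; simp [hi]
  | cons o' os' ih =>
    intro o h i hi
    have h' : (o' :: os').Pairwise (· < ·) := (List.pairwise_cons.1 h).2
    rw [List.getLastD_cons]
    rcases List.mem_cons.1 hi with h1 | hi
    · have ho : o < o' := (List.pairwise_cons.1 h).1 o' (by simp)
      have h2 := ih o' h' o' (by simp)
      rw [h1]
      exact le_trans (le_of_lt ho) h2
    · exact ih o' h' i hi

theorem getLastD_mem (os : List Int) : ∀ (o : Int), os.getLastD o ∈ o :: os := by
  induction os with
  | nil => intro o; simp
  | cons o' os' ih =>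
    intro o
    rw [List.getLastD_cons]
    exact List.mem_cons_of_mem o (ih o')

-- two pairwise-< integer lists with the same members are equal
theorem eq_of_pairwise_lt_of_mem_iff (l₁ l₂ : List Int)
    (h₁ : l₁.Pairwise (· < ·)) (h₂ : l₂.Pairwise (· < ·))
    (hm : ∀ x, x ∈ l₁ ↔ x ∈ l₂) : l₁ = l₂ := by
  have hp : l₁.Perm l₂ :=
    (List.perm_ext_iff_of_nodup (h₁.imp ne_of_lt) (h₂.imp ne_of_lt)).2 hm
  exact List.Perm.eq_of_pairwise (fun a b _ _ h h' => absurd h' (lt_asymm h)) h₁ h₂ hp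

-- B's inner fold: characterization via occG
theorem foldB_empty (day : List (List String)) : ∀ (s f l c : Int), occG day s = [] →
    (PySem.List.enumerate day s).foldl pvCellStep (f, l, c) = (f, l, c) := by
  induction day with
  | nil => intro s f l c _; simp [PySem.List.enumerate]
  | cons x xs ih =>
    intro s f l c h
    rw [occG_cons] at h
    by_cases hx : 0 < x.length
    · simp [hx] at h
    · simp only [hx, if_false] at h
      rw [PySem.List.enumerate_cons, List.foldl_cons]
      have hx'2 : x.isEmpty = true := by
        cases x with
        | nil => rfl
        | cons a l => simp at hx
      simp only [pvCellStep, hx'2, if_true]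
      exact ih (s + 1) f l c h

theorem foldB_cons (day : List (List String)) : ∀ (s f l c o : Int) (os : List Int),
    0 ≤ s → occG day s = o :: os →
    (PySem.List.enumerate day s).foldl pvCellStep (f, l, c) =
      ((if f < 0 then o else f), os.getLastD o, c + 1 + os.length) := by
  induction day with
  | nil => intro s f l c o os _ h; rw [occG_nil] at h; cases h
  | cons x xs ih =>
    intro s f l c o os hs h
    rw [occG_cons] at h
    rw [PySem.List.enumerate_cons, List.foldl_cons]
    by_cases hx : 0 < x.length
    · simp only [hx, if_true] at h
      injection h with ho hos
      subst ho; subst hos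
      have hx' : x.isEmpty = false := by
        cases x with
        | nil => simp at hx
        | cons a l => rfl
      simp only [pvCellStep, hx', Bool.false_eq_true, if_false]
      rcases hocc : occG xs (s + 1) with _ | ⟨o', os'⟩
      · rw [foldB_empty xs (s + 1) _ _ _ hocc]
        simp
      · rw [ih (s + 1) _ _ _ o' os' (by omega) hocc]
        have hfge : ¬ ((if f < 0 then s else f) < 0) := by
          by_cases hf : f < 0 <;> simp [hf] <;> omega
        rw [List.getLastD_cons]
        simp only [hfge, if_false, Prod.mk.injEq]
        refine ⟨trivial, trivial, ?_⟩
        simp only [List.length_cons]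
        push_cast
        ring
    · simp only [hx, if_false] at h
      have hx'2 : x.isEmpty = true := by
        cases x with
        | nil => rfl
        | cons a l => simp at hx
      simp only [pvCellStep, hx'2, if_true]
      exact ih (s + 1) f l c o os (by omega) h

-- the occupied indices of [o, e] are exactly occG day 0, when o,e are its first/last
theorem filter_range_eq (day : List (List String)) (o : Int) (os : List Int)
    (h : occG day 0 = o :: os) :
    (PySem.List.pyRange o (os.getLastD o + 1) 1).filter
        (fun i => decide (0 < (PySem.List.pyGetD day i []).length)) = o :: os := by
  have hpw := pairwise_occG day 0
  rw [h] at hpw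
  have hmem : ∀ i, i ∈ (o :: os) → ∃ k : Nat, ∃ hk : k < day.length, i = (k : Int) ∧ 0 < day[k].length := by
    intro i hi
    have := (mem_occG day 0 i).1 (h ▸ hi)
    simpa using this
  have ho_mem : o ∈ o :: os := by simp
  have he_mem : os.getLastD o ∈ o :: os := getLastD_mem os o
  apply eq_of_pairwise_lt_of_mem_iff
  · exact (PySem.List.pairwise_lt_pyRange_one o (os.getLastD o + 1)).filter _
  · exact hpw
  · intro x
    simp only [List.mem_filter, PySem.List.mem_pyRange_one, decide_eq_true_eq]
    constructor
    · rintro ⟨⟨hox, hxe⟩, hocc⟩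
      -- x is in range and occupied; show it is in occG day 0 = o :: os
      rcases hmem o ho_mem with ⟨ko, hko, hoe, _⟩
      rcases hmem _ he_mem with ⟨ke, hke, hee, _⟩
      have hx0 : 0 ≤ x := le_trans (by omega) hox
      have hxlen : x < (day.length : Int) := by omega
      rw [PySem.List.pyGetD_eq_getElem day [] hx0 hxlen] at hocc
      rw [← h, mem_occG]
      exact ⟨x.toNat, by omega, by omega, hocc⟩
    · intro hx
      rcases hmem x hx with ⟨k, hk, rfl, hocc⟩
      refine ⟨⟨head_le_of_pairwise o os hpw _ hx, by
        have := le_getLastD_of_pairwise os o hpw _ hx; omega⟩, ?_⟩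
      rw [PySem.List.pyGetD_eq_getElem day [] (by omega) (by exact_mod_cast hk)]
      simpa using hocc

-- A's inner sum as the closed form
theorem sumA_closed (day : List (List String)) (o : Int) (os : List Int)
    (h : occG day 0 = o :: os) :
    ((PySem.List.pyRange o (os.getLastD o + 1) 1).map
        (fun i => if (PySem.List.pyGetD day i []).length = 0 then (1 : Int) else 0)).sum
      = (os.getLastD o - o + 1) - (1 + os.length) := by
  set e := os.getLastD o with he
  set r := PySem.List.pyRange o (e + 1) 1 with hr
  have hsum : ((r.map (fun i => if (PySem.List.pyGetD day i []).length = 0 then (1 : Int) else 0)).sum)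
      = (r.countP (fun i => decide ((PySem.List.pyGetD day i []).length = 0)) : Int) := by
    rw [← PySem.List.sum_map_ite_one_zero (fun i => decide ((PySem.List.pyGetD day i []).length = 0)) r]
    simp
  rw [hsum]
  have hsplit := List.length_eq_countP_add_countP
    (p := fun i => decide ((PySem.List.pyGetD day i []).length = 0)) (l := r)
  have hcongr : r.countP (fun a => decide ¬ (decide ((PySem.List.pyGetD day a []).length = 0)) = true)
      = r.countP (fun i => decide (0 < (PySem.List.pyGetD day i []).length)) := by
    apply List.countP_congr
    intro i _
    simp [Nat.pos_iff_ne_zero]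
  have hfil : r.countP (fun i => decide (0 < (PySem.List.pyGetD day i []).length)) = (o :: os).length := by
    rw [List.countP_eq_length_filter, hr, filter_range_eq day o os h]
  have hoe : o ≤ e := by
    have hpw := pairwise_occG day 0
    rw [h] at hpw
    exact he ▸ le_getLastD_of_pairwise os o hpw o (by simp)
  have hlen : r.length = (e + 1 - o).toNat := by
    rw [hr]; exact PySem.List.length_pyRange_one o (e + 1)
  have hlen' : (r.length : Int) = e + 1 - o := by rw [hlen]; omega
  have := congrArg (fun n : Nat => (n : Int)) hsplit
  simp only [Nat.cast_add] at this
  rw [hcongr, hfil] at this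
  simp only [List.length_cons] at this
  omega

-- per-day: A's step equals B's step
theorem step_eq (p1 : Int) (day : List (List String)) : pvStepA p1 day = pvStepB p1 day := by
  rcases h : pvOccA day with _ | ⟨o, os⟩
  · have h0 : occG day 0 = [] := h
    simp only [pvStepA, pvStepB, h, foldB_empty day 0 (-1) (-1) 0 h0]
    norm_num
  · have h0 : occG day 0 = o :: os := h
    simp only [pvStepA, pvStepB, h, foldB_cons day 0 (-1) (-1) 0 o os (by omega) h0]
    rw [sumA_closed day o os h0]
    have hne : (0 : Int) + 1 + (os.length : Int) ≠ 0 := by positivity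
    simp only [ne_eq, hne, not_false_eq_true, if_true]
    norm_num

-- ===== VERDICT (by name: the statement is the Claim_ definition above) =====
theorem calculate_p1_final_spec : Claim_equal_calculate_p1_final := by
  intro solution dataset _
  unfold Spec_calculate_p1_final calculate_p1_final calculate_p1_final_alt
  have : pvStepA = pvStepB := funext fun p1 => funext fun day => step_eq p1 day
  rw [this]
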